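-- pv_equiv track=rewrite | github.com/sohyeon-jeon/Dev-Dictionary | Algorithm/Programmers/모의고사.py | solution
-- ===== SOURCE A (Python) =====
-- from collections import defaultdict
--
-- def solution(answers):
--     answer = []
--     one=[1,2,3,4,5]
--     two=[2,1,2,3,2,4,2,5]
--     three=[3,3,1,1,2,2,4,4,5,5]
--
--     correct=defaultdict(int)
--
--
--     for i,v in enumerate(answers):
--         if answers[i]==one[i%len(one)]:
--             correct[1]+=1
--         if answers[i]==two[i%len(two)]:
--             correct[2]+=1
--         if answers[i]==three[i%len(three)]:
--             correct[3]+=1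
--
--     max_score=max(correct.values())
--     for k,v in correct.items():
--         if v==max_score:
--             answer.append(k)
--
--     return sorted(answer)
-- ===== SOURCE B (Python) =====
-- def solution(answers):
--     patterns = [[1, 2, 3, 4, 5], [2, 1, 2, 3, 2, 4, 2, 5], [3, 3, 1, 1, 2, 2, 4, 4, 5, 5]]
--     scores = []
--     for p in patterns:
--         scores.append(sum(answers[j::len(p)].count(p[j]) for j in range(len(p))))
--     best = max(scores)
--     return [k for k in (1, 2, 3) if scores[k - 1] == best]
-- ===== Notes on version B (the rewrite author's own statement) =====
-- stated objective: alternative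
-- what changed: Inverts the iteration: instead of one pass over answers testing all three patterns per element into a defaultdict, B loops over each pattern's POSITIONS and counts hits with list.count on the stride slice answers[j::len(p)] (no per-element comparison loop, no dict), then picks the argmax indices from the fixed score list.
import Mathlib
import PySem

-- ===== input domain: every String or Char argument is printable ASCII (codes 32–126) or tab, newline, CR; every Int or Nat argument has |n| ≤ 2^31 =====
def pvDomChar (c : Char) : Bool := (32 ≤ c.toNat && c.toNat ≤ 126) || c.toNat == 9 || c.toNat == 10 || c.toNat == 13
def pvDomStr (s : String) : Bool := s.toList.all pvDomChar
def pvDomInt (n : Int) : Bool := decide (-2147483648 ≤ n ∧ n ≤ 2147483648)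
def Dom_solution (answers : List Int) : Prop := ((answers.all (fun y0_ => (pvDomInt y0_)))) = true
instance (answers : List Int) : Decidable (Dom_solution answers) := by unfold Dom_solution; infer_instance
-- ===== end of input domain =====

-- B inverts the iteration: instead of A's single pass over answers testing all three patterns per
-- element into a defaultdict, B loops over each pattern's positions j and counts hits with
-- list.count on the stride slice answers[j::len(p)], then picks the argmax indices from the fixed
-- score list (objective: alternative; return value only, no mutation in either).

-- ===== PORT A =====
def oneA : List Int := [1, 2, 3, 4, 5]
def twoA : List Int := [2, 1, 2, 3, 2, 4, 2, 5]
def threeA : List Int := [3, 3, 1, 1, 2, 2, 4, 4, 5, 5]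

-- the test 'answers[i] == pat[i % len(pat)]'; with (i, v) from enumerate(answers), answers[i] IS v,
-- and 0 ≤ i % len(pat) < len(pat), so the indexing is exact (never raises)
def hitA (p : List Int) (iv : Int × Int) : Bool :=
  iv.2 == PySem.List.pyGetD p (PySem.Int.mod iv.1 (p.length : Int)) 0

-- the body of A's 'for i, v in enumerate(answers)' loop: three independent ifs, correct[k] += 1
def stepA (d : PySem.Dict Int Int) (iv : Int × Int) : PySem.Dict Int Int :=
  let d1 := if hitA oneA iv then d.modify 1 0 (· + 1) else d
  let d2 := if hitA twoA iv then d1.modify 2 0 (· + 1) else d1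
  if hitA threeA iv then d2.modify 3 0 (· + 1) else d2

def solution (answers : List Int) : List Int :=
  let correct := (PySem.List.enumerate answers).foldl stepA PySem.Dict.empty
  match PySem.List.max? correct.values (fun v => v) with
  | none => []  -- Python: max() of an empty sequence raises ValueError; excluded by Pre_solution
  | some maxScore =>
    let answer := correct.items.foldl
      (fun acc kv => if kv.2 == maxScore then acc ++ [kv.1] else acc) ([] : List Int)
    PySem.List.sorted answer (fun x => x)

-- ===== PORT B =====
def patternsB : List (List Int) := [[1, 2, 3, 4, 5], [2, 1, 2, 3, 2, 4, 2, 5], [3, 3, 1, 1, 2, 2, 4, 4, 5, 5]]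

-- sum(answers[j::len(p)].count(p[j]) for j in range(len(p))); slice? is some whenever the
-- step len(p) ≠ 0, so '.getD []' is exact for the three nonempty patterns B applies it to
def scoreB (answers p : List Int) : Int :=
  ((PySem.List.pyRange 0 (p.length : Int) 1).map (fun j =>
    ((PySem.List.count ((PySem.List.slice? answers (some j) none (p.length : Int)).getD [])
        (PySem.List.pyGetD p j 0) : Nat) : Int))).sum

def solution_alt (answers : List Int) : List Int :=
  let scores := patternsB.foldl (fun acc p => acc ++ [scoreB answers p]) ([] : List Int)
  match PySem.List.max? scores (fun v => v) with
  | none => []  -- unreachable: scores always has three elements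
  | some best =>
    ([1, 2, 3] : List Int).foldl
      (fun acc k => if PySem.List.pyGetD scores (k - 1) 0 == best then acc ++ [k] else acc)
      ([] : List Int)

-- ===== PRECONDITION & SPEC =====
-- Pre_ excludes exactly the inputs where no answer matches any pattern: there A's defaultdict stays
-- empty and max() raises ValueError (A returns no value).
def Pre_solution (answers : List Int) : Prop :=
  ((PySem.List.enumerate answers).any (fun ia =>
      ia.2 == PySem.List.pyGetD [1, 2, 3, 4, 5] (PySem.Int.mod ia.1 (([1, 2, 3, 4, 5] : List Int).length : Int)) 0
   || ia.2 == PySem.List.pyGetD [2, 1, 2, 3, 2, 4, 2, 5] (PySem.Int.mod ia.1 (([2, 1, 2, 3, 2, 4, 2, 5] : List Int).length : Int)) 0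
   || ia.2 == PySem.List.pyGetD [3, 3, 1, 1, 2, 2, 4, 4, 5, 5] (PySem.Int.mod ia.1 (([3, 3, 1, 1, 2, 2, 4, 4, 5, 5] : List Int).length : Int)) 0)) = true
instance (answers : List Int) : Decidable (Pre_solution answers) := by unfold Pre_solution; infer_instance

def pvWitness_solution : List Int := [1]

def Spec_solution (answers : List Int) (out : List Int) : Prop := out = solution_alt answers
instance (answers : List Int) (out : List Int) : Decidable (Spec_solution answers out) := by unfold Spec_solution; infer_instance

-- ===== CLAIM (what is proved, stated in full; the proofs are below) =====
def Claim_equal_solution : Prop := ∀ (answers : List Int), Dom_solution answers → Pre_solution answers → Spec_solution answers (solution answers)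
-- ===== LEMMAS AND PROOFS =====

-- A's dict after the loop, and the per-pattern hit count, as named objects for the proofs
def dictA (answers : List Int) : PySem.Dict Int Int :=
  (PySem.List.enumerate answers).foldl stepA PySem.Dict.empty
def cntA (p : List Int) (answers : List Int) : Nat :=
  (PySem.List.enumerate answers).countP (hitA p)

lemma stepA_getD1 (d : PySem.Dict Int Int) (iv : Int × Int) :
    (stepA d iv).getD 1 0 = d.getD 1 0 + (if hitA oneA iv then 1 else 0) := by
  simp only [stepA]; split_ifs <;> simp_all [PySem.Dict.getD_modify]

lemma stepA_getD2 (d : PySem.Dict Int Int) (iv : Int × Int) :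
    (stepA d iv).getD 2 0 = d.getD 2 0 + (if hitA twoA iv then 1 else 0) := by
  simp only [stepA]; split_ifs <;> simp_all [PySem.Dict.getD_modify]

lemma stepA_getD3 (d : PySem.Dict Int Int) (iv : Int × Int) :
    (stepA d iv).getD 3 0 = d.getD 3 0 + (if hitA threeA iv then 1 else 0) := by
  simp only [stepA]; split_ifs <;> simp_all [PySem.Dict.getD_modify]

lemma stepA_mem_keys (d : PySem.Dict Int Int) (iv : Int × Int) (k : Int) :
    k ∈ (stepA d iv).keys ↔
      ((k = 1 ∧ hitA oneA iv = true) ∨ (k = 2 ∧ hitA twoA iv = true) ∨ (k = 3 ∧ hitA threeA iv = true) ∨ k ∈ d.keys) := by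
  simp only [stepA]
  split_ifs <;> simp_all [PySem.Dict.keys_modify, PySem.Dict.mem_keys_insert] <;> tauto

lemma stepA_nodup (d : PySem.Dict Int Int) (iv : Int × Int) (h : d.keys.Nodup) :
    (stepA d iv).keys.Nodup := by
  simp only [stepA]
  split_ifs <;>
    (repeat first
      | exact h
      | (rw [PySem.Dict.keys_modify]; apply PySem.Dict.nodup_keys_insert))

lemma foldA_getD (l : List (Int × Int)) (p : List Int) (j : Int)
    (hstep : ∀ (d : PySem.Dict Int Int) iv, (stepA d iv).getD j 0 = d.getD j 0 + (if hitA p iv then 1 else 0)) :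
    ∀ d : PySem.Dict Int Int,
      (l.foldl stepA d).getD j 0 = d.getD j 0 + (l.countP (hitA p) : Int) := by
  induction l with
  | nil => intro d; simp
  | cons x t ih =>
    intro d
    simp only [List.foldl_cons, ih, hstep, List.countP_cons]
    by_cases h : hitA p x = true <;> simp [h] <;> push_cast <;> ring

set_option maxHeartbeats 1000000 in
lemma foldA_mem (l : List (Int × Int)) :
    ∀ (d : PySem.Dict Int Int) (k : Int),
      k ∈ (l.foldl stepA d).keys ↔
        ((k = 1 ∧ l.countP (hitA oneA) ≠ 0) ∨ (k = 2 ∧ l.countP (hitA twoA) ≠ 0) ∨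
         (k = 3 ∧ l.countP (hitA threeA) ≠ 0) ∨ k ∈ d.keys) := by
  induction l with
  | nil => intro d k; simp
  | cons x t ih =>
    intro d k
    rw [List.foldl_cons, ih, stepA_mem_keys]
    by_cases h1 : hitA oneA x = true <;> by_cases h2 : hitA twoA x = true <;>
      by_cases h3 : hitA threeA x = true <;>
      simp only [List.countP_cons, h1, h2, h3, eq_self_iff_true, if_true, if_false,
        ite_true, ite_false, Nat.add_zero, ne_eq, Nat.add_one_ne_zero, not_false_eq_true,
        and_true] <;>
      tauto

lemma foldA_nodup (l : List (Int × Int)) :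
    ∀ d : PySem.Dict Int Int, d.keys.Nodup → (l.foldl stepA d).keys.Nodup := by
  induction l with
  | nil => intro d h; simpa using h
  | cons x t ih => intro d h; exact ih _ (stepA_nodup _ _ h)

lemma dictA_getD1 (answers : List Int) : (dictA answers).getD 1 0 = (cntA oneA answers : Int) := by
  simpa [PySem.Dict.getD_empty] using
    foldA_getD (PySem.List.enumerate answers) oneA 1 stepA_getD1 PySem.Dict.empty

lemma dictA_getD2 (answers : List Int) : (dictA answers).getD 2 0 = (cntA twoA answers : Int) := by
  simpa [PySem.Dict.getD_empty] using
    foldA_getD (PySem.List.enumerate answers) twoA 2 stepA_getD2 PySem.Dict.empty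

lemma dictA_getD3 (answers : List Int) : (dictA answers).getD 3 0 = (cntA threeA answers : Int) := by
  simpa [PySem.Dict.getD_empty] using
    foldA_getD (PySem.List.enumerate answers) threeA 3 stepA_getD3 PySem.Dict.empty

lemma dictA_mem (answers : List Int) (k : Int) :
    k ∈ (dictA answers).keys ↔
      ((k = 1 ∧ cntA oneA answers ≠ 0) ∨ (k = 2 ∧ cntA twoA answers ≠ 0) ∨ (k = 3 ∧ cntA threeA answers ≠ 0)) := by
  unfold dictA cntA
  rw [foldA_mem]
  simp only [PySem.Dict.keys_empty, List.not_mem_nil, or_false]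

lemma dictA_nodup (answers : List Int) : (dictA answers).keys.Nodup := by
  exact foldA_nodup _ _ (by simp [PySem.Dict.keys_empty])

lemma solution_eq (answers : List Int) (M : Int)
    (hM : PySem.List.max? (dictA answers).values (fun v => v) = some M) :
    solution answers =
      PySem.List.sorted ((dictA answers).keys.filter (fun k => (dictA answers).getD k 0 == M)) (fun x => x) := by
  have hnd := dictA_nodup answers
  have hrepr : solution answers = (match PySem.List.max? (dictA answers).values (fun v => v) with
    | none => ([] : List Int)
    | some maxScore =>
      PySem.List.sorted ((dictA answers).items.foldl
        (fun acc (kv : Int × Int) => if kv.2 == maxScore then acc ++ [kv.1] else acc) ([] : List Int)) (fun x => x)) := rfl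
  rw [hrepr, hM]
  show PySem.List.sorted ((dictA answers).items.foldl
    (fun acc (kv : Int × Int) => if kv.2 == M then acc ++ [kv.1] else acc) ([] : List Int)) (fun x => x) = _
  rw [PySem.List.foldl_append_if (fun kv : Int × Int => kv.2 == M) Prod.fst]
  rw [PySem.Dict.items_eq_map_keys _ hnd 0, List.filter_map, List.map_map]
  simp [Function.comp_def]

lemma pre_cnt (answers : List Int) (h : Pre_solution answers) :
    cntA oneA answers ≠ 0 ∨ cntA twoA answers ≠ 0 ∨ cntA threeA answers ≠ 0 := by
  rw [Pre_solution, List.any_eq_true] at h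
  obtain ⟨ia, hia, hor⟩ := h
  simp only [Bool.or_eq_true] at hor
  rcases hor with (h1 | h2) | h3
  · exact Or.inl (by
      have : 0 < (PySem.List.enumerate answers).countP (hitA oneA) :=
        List.countP_pos_iff.mpr ⟨ia, hia, by simpa [hitA, oneA] using h1⟩
      simp only [cntA]; omega)
  · exact Or.inr (Or.inl (by
      have : 0 < (PySem.List.enumerate answers).countP (hitA twoA) :=
        List.countP_pos_iff.mpr ⟨ia, hia, by simpa [hitA, twoA] using h2⟩
      simp only [cntA]; omega))
  · exact Or.inr (Or.inr (by
      have : 0 < (PySem.List.enumerate answers).countP (hitA threeA) :=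
        List.countP_pos_iff.mpr ⟨ia, hia, by simpa [hitA, threeA] using h3⟩
      simp only [cntA]; omega))

-- ===== the B side: stride slices =====

def strideB (L : Nat) : List Int → List Int
  | [] => []
  | a :: t => a :: strideB L (t.drop (L - 1))
termination_by xs => xs.length
decreasing_by simp only [List.length_drop, List.length_cons]; omega

def cntC (L m : Nat) : Nat := (m + L - 1) / L

lemma filterMap_stride (L : Nat) (hL : 0 < L) :
    ∀ (m : Nat) (xs : List Int) (j : Nat), xs.length - j = m →
      List.filterMap (fun k : Nat => xs[(j + L * k)]?) (List.range (cntC L (xs.length - j)))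
        = strideB L (xs.drop j) := by
  intro m
  induction m using Nat.strong_induction_on with
  | _ m ih =>
    intro xs j hm
    by_cases hj : xs.length ≤ j
    · have h0 : xs.length - j = 0 := by omega
      have hc : cntC L 0 = 0 := by unfold cntC; exact Nat.div_eq_of_lt (by omega)
      rw [h0, hc, List.drop_eq_nil_of_le hj]
      simp [strideB]
    · replace hj : j < xs.length := by omega
      have hm1 : 1 ≤ xs.length - j := by omega
      have hc : cntC L (xs.length - j) = (xs.length - j - 1) / L + 1 := by
        unfold cntC
        rw [show xs.length - j + L - 1 = (xs.length - j - 1) + L by omega, Nat.add_div_right _ hL]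
      have hdrop : xs.drop j = xs[j] :: xs.drop (j + 1) := List.drop_eq_getElem_cons hj
      have hstr : strideB L (xs.drop j) = xs[j] :: strideB L (xs.drop (j + L)) := by
        rw [hdrop, strideB, List.drop_drop]
        congr 3
        omega
      rw [hc, hstr, List.range_succ_eq_map, List.filterMap_cons]
      simp only [Nat.mul_zero, Nat.add_zero, List.getElem?_eq_getElem hj]
      rw [List.filterMap_map]
      have hfun : ((fun k : Nat => xs[(j + L * k)]?) ∘ (fun k => k + 1))
          = fun k : Nat => xs[((j + L) + L * k)]? := by
        funext k; simp only [Function.comp]; congr 1; ring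
      rw [hfun]
      have hcnt2 : (xs.length - j - 1) / L = cntC L (xs.length - (j + L)) := by
        by_cases h : xs.length - j ≤ L
        · have : xs.length - (j + L) = 0 := by omega
          rw [this]
          have : cntC L 0 = 0 := by unfold cntC; exact Nat.div_eq_of_lt (by omega)
          rw [this]
          exact Nat.div_eq_of_lt (by omega)
        · replace h : L < xs.length - j := by omega
          unfold cntC
          rw [show xs.length - (j + L) + L - 1 = (xs.length - j - 1) - L + L by omega,
              Nat.add_div_right _ hL,
              show xs.length - j - 1 = (xs.length - j - 1 - L) + L by omega,
              Nat.add_div_right _ hL, Nat.add_sub_cancel]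
      rw [hcnt2, ih (xs.length - (j + L)) (by omega) xs (j + L) rfl]

lemma slice?_stride (L : Nat) (hL : 0 < L) (xs : List Int) (j : Nat) :
    PySem.List.slice? xs (some (j : Int)) none (L : Int) = some (strideB L (xs.drop j)) := by
  have hLne : (L : Int) ≠ 0 := by exact_mod_cast hL.ne'
  have hnotneg : ¬ ((L : Int) < 0) := by exact_mod_cast Int.not_lt.mpr (Int.natCast_nonneg L)
  have hjnn : ¬ ((j : Int) < 0) := by exact_mod_cast Int.not_lt.mpr (Int.natCast_nonneg j)
  have hsi : PySem.List.sliceIndices xs.length (some (j : Int)) none (L : Int)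
      = (min (j : Int) (xs.length : Int), (xs.length : Int), (L : Int)) := by
    simp [PySem.List.sliceIndices, hnotneg, hjnn]
  rw [PySem.List.slice?]
  simp only [hLne, if_false, hsi]
  congr 1
  by_cases hj : j ≤ xs.length
  · have hmin : min (j : Int) (xs.length : Int) = (j : Int) := by
      exact min_eq_left (by exact_mod_cast hj)
    rw [hmin]
    have hLpos : (0 : Int) < (L : Int) := by exact_mod_cast hL
    by_cases hlt : j < xs.length
    · have hlt' : (j : Int) < (xs.length : Int) := by exact_mod_cast hlt
      have hcount : (((xs.length : Int) - (j : Int) + (L : Int) - 1) / (L : Int)).toNat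
          = cntC L (xs.length - j) := by
        have h1 : ((xs.length : Int) - (j : Int) + (L : Int) - 1) = ((xs.length - j + L - 1 : Nat) : Int) := by
          push_cast [hj]; omega
        rw [h1, cntC]
        rw [show ((L : Int)) = ((L : Nat) : Int) from rfl, ← Int.natCast_div, Int.toNat_natCast]
      simp only [hLpos, if_true, hlt', if_pos, hcount]
      have hfun : (fun k : Nat => xs[((j : Int) + (L : Int) * (k : Int)).toNat]?)
          = fun k : Nat => xs[j + L * k]? := by
        funext k
        have h2 : ((j : Int) + (L : Int) * (k : Int)) = ((j + L * k : Nat) : Int) := by push_cast; ring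
        rw [h2, Int.toNat_natCast]
      calc List.filterMap (fun k : Nat => xs[((j:Int) + (L:Int) * (k:Int)).toNat]?) (List.range (cntC L (xs.length - j)))
          = List.filterMap (fun k : Nat => xs[j + L * k]?) (List.range (cntC L (xs.length - j))) := by rw [hfun]
        _ = strideB L (xs.drop j) := filterMap_stride L hL _ xs j rfl
    · have hj' : j = xs.length := by omega
      have : ¬ ((j : Int) < (xs.length : Int)) := by exact_mod_cast not_lt.mpr (le_of_eq hj'.symm)
      simp [this, List.drop_eq_nil_of_le (le_of_eq hj'.symm), strideB]
      intro a ha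
      rw [if_pos hL] at ha
      omega
  · have hj' : xs.length ≤ j := by omega
    have hmin : min (j : Int) (xs.length : Int) = (xs.length : Int) := by
      exact min_eq_right (by exact_mod_cast hj')
    rw [hmin]
    have hLpos : (0 : Int) < (L : Int) := by exact_mod_cast hL
    simp [List.drop_eq_nil_of_le hj', strideB]

lemma rot_getD (q : List Int) (L : Nat) (hq : q.length = L) (hL : 0 < L) (i : Nat) :
    (q.drop 1 ++ q.take 1).getD (i % L) 0 = q.getD ((i + 1) % L) 0 := by
  have hj : i % L < L := Nat.mod_lt _ hL
  have hdl : (q.drop 1).length = L - 1 := by simp [hq]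
  by_cases h : i % L + 1 < L
  · have h1 : (i + 1) % L = i % L + 1 := by
      rw [Nat.add_mod, Nat.one_mod_eq_one.mpr (by omega), Nat.mod_eq_of_lt h]
    rw [h1]
    rw [List.getD_eq_getElem?_getD, List.getElem?_append_left (by omega), List.getElem?_drop,
      List.getD_eq_getElem?_getD]
    congr 2
    omega
  · have hL1 : i % L = L - 1 := by omega
    have h1 : (i + 1) % L = 0 := by
      rw [Nat.add_mod, hL1]
      rcases Nat.eq_or_lt_of_le hL with hE | hG
      · simp [← hE]
      · rw [Nat.one_mod_eq_one.mpr (by omega), show L - 1 + 1 = L by omega, Nat.mod_self]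
    rw [h1, hL1]
    rw [List.getD_eq_getElem?_getD, List.getElem?_append_right (by omega), hdl, Nat.sub_self,
      List.getElem?_take_of_lt (by omega), List.getD_eq_getElem?_getD]

lemma stride_sum_count (L : Nat) (hL : 0 < L) :
    ∀ (xs q : List Int), q.length = L →
      ((List.range L).map (fun j => (strideB L (xs.drop j)).count (q.getD j 0))).sum
        = (List.range xs.length).countP (fun i => xs.getD i 0 == q.getD (i % L) 0) := by
  intro xs
  induction xs with
  | nil =>
    intro q hq
    simp [strideB]
  | cons a t ih =>
    intro q hq
    have hq' : (q.drop 1 ++ q.take 1).length = L := by simp [hq]; omega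
    have hIH := ih (q.drop 1 ++ q.take 1) hq'
    -- right-hand side of the goal
    have hRHS : (List.range (a :: t).length).countP
          (fun i => (a :: t).getD i 0 == q.getD (i % L) 0)
        = (if (a == q.getD 0 0) then 1 else 0)
          + (List.range t.length).countP
              (fun i => t.getD i 0 == (q.drop 1 ++ q.take 1).getD (i % L) 0) := by
      rw [List.length_cons, List.range_succ_eq_map, List.countP_cons, List.countP_map]
      have : ∀ i : Nat, ((fun i => (a :: t).getD i 0 == q.getD (i % L) 0) ∘ Nat.succ) i
          = (fun i => t.getD i 0 == (q.drop 1 ++ q.take 1).getD (i % L) 0) i := by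
        intro i
        simp only [Function.comp, Nat.succ_eq_add_one, List.getD_cons_succ]
        rw [rot_getD q L hq hL i]
      rw [List.countP_congr (fun i _ => by rw [this i])]
      simp [Nat.zero_mod]
      omega
    -- left-hand side of the goal
    have hL0 : L - 1 + 1 = L := by omega
    have hhead : strideB L ((a :: t).drop 0) = a :: strideB L (t.drop (L - 1)) := by
      rw [List.drop_zero, strideB]
    have hLHS : ((List.range L).map
          (fun j => (strideB L ((a :: t).drop j)).count (q.getD j 0))).sum
        = (if (a == q.getD 0 0) then 1 else 0)
          + ((List.range L).map
              (fun j => (strideB L (t.drop j)).count ((q.drop 1 ++ q.take 1).getD j 0))).sum := by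
      have hcons : List.range L = 0 :: (List.range (L - 1)).map Nat.succ := by
        conv_lhs => rw [← hL0]
        rw [List.range_succ_eq_map]
      have happ : List.range L = List.range (L - 1) ++ [L - 1] := by
        conv_lhs => rw [← hL0]
        rw [List.range_succ]
      conv_lhs => rw [hcons]
      rw [List.map_cons, List.map_map, List.sum_cons]
      rw [hhead, List.count_cons]
      conv_rhs => rw [happ]
      rw [List.map_append, List.sum_append]
      have hmapeq : (List.range (L - 1)).map
            ((fun j => (strideB L ((a :: t).drop j)).count (q.getD j 0)) ∘ Nat.succ)
          = (List.range (L - 1)).map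
            (fun j => (strideB L (t.drop j)).count ((q.drop 1 ++ q.take 1).getD j 0)) := by
        apply List.map_congr_left
        intro j hj
        rw [List.mem_range] at hj
        simp only [Function.comp, Nat.succ_eq_add_one, List.drop_succ_cons]
        have h3 := rot_getD q L hq hL j
        rw [Nat.mod_eq_of_lt (by omega), Nat.mod_eq_of_lt (by omega)] at h3
        rw [← h3]
      rw [hmapeq]
      have hlast : ((q.drop 1 ++ q.take 1)).getD (L - 1) 0 = q.getD 0 0 := by
        have h3 := rot_getD q L hq hL (L - 1)
        rw [Nat.mod_eq_of_lt (by omega), show L - 1 + 1 = L by omega, Nat.mod_self] at h3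
        exact h3
      simp only [List.map_cons, List.sum_cons, List.map_nil, List.sum_nil, hlast]
      omega
    rw [hLHS, hRHS, hIH]


lemma cntA_range (p : List Int) (answers : List Int) :
    cntA p answers = (List.range answers.length).countP
      (fun i => answers.getD i 0 == p.getD (i % p.length) 0) := by
  unfold cntA
  rw [PySem.List.enumerate_eq_map_pyRange (d := 0), List.countP_map]
  rw [show PySem.List.len answers = (answers.length : Int) from PySem.List.len_eq answers,
    PySem.List.pyRange_one, List.countP_map]
  have hn : ((answers.length : Int) - 0).toNat = answers.length := by omega
  rw [hn]
  apply List.countP_congr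
  intro k _
  simp only [Function.comp, hitA, zero_add, PySem.List.pyGetD_natCast, PySem.Int.mod_natCast,
    PySem.List.pyGetD_natCast]

lemma scoreB_eq (p : List Int) (hp : p ≠ []) (answers : List Int) :
    scoreB answers p = (cntA p answers : Int) := by
  have hL : 0 < p.length := List.length_pos_iff.mpr hp
  unfold scoreB
  rw [PySem.List.pyRange_one]
  have hn : ((p.length : Int) - 0).toNat = p.length := by omega
  rw [hn, List.map_map]
  have hfun : ((fun j : Int =>
        ((PySem.List.count ((PySem.List.slice? answers (some j) none (p.length : Int)).getD [])
          (PySem.List.pyGetD p j 0) : Nat) : Int)) ∘ (fun k : Nat => (0 : Int) + (k : Int)))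
      = (fun k : Nat => (((strideB p.length (answers.drop k)).count (p.getD k 0) : Nat) : Int)) := by
    funext k
    simp only [Function.comp, zero_add]
    rw [slice?_stride p.length hL answers k, Option.getD_some, PySem.List.pyGetD_natCast,
      PySem.List.count_eq]
  rw [hfun]
  rw [show (fun k : Nat => (((strideB p.length (answers.drop k)).count (p.getD k 0) : Nat) : Int))
      = (Nat.cast ∘ fun k : Nat => (strideB p.length (answers.drop k)).count (p.getD k 0)) from rfl]
  rw [← List.map_map, ← Nat.cast_list_sum]
  rw [stride_sum_count p.length hL answers p rfl, cntA_range p answers]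

lemma alt_eq (answers : List Int) :
    solution_alt answers =
      List.map Prod.fst (List.filter
        (fun ns => ns.2 == max (max (cntA oneA answers : Int) (cntA twoA answers)) (cntA threeA answers))
        [((1 : Int), (cntA oneA answers : Int)), (2, (cntA twoA answers : Int)), (3, (cntA threeA answers : Int))]) := by
  have h1 : scoreB answers [1, 2, 3, 4, 5] = (cntA oneA answers : Int) :=
    scoreB_eq oneA (by decide) answers
  have h2 : scoreB answers [2, 1, 2, 3, 2, 4, 2, 5] = (cntA twoA answers : Int) :=
    scoreB_eq twoA (by decide) answers
  have h3 : scoreB answers [3, 3, 1, 1, 2, 2, 4, 4, 5, 5] = (cntA threeA answers : Int) :=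
    scoreB_eq threeA (by decide) answers
  unfold solution_alt patternsB
  simp only [List.foldl_cons, List.foldl_nil, List.nil_append, List.append_assoc, List.cons_append,
    List.nil_append]
  simp only [h1, h2, h3]
  rw [PySem.List.max?_id_cons]
  simp only [List.foldl_cons, List.foldl_nil]
  set c1 := (cntA oneA answers : Int)
  set c2 := (cntA twoA answers : Int)
  set c3 := (cntA threeA answers : Int)
  have e1 : PySem.List.pyGetD [c1, c2, c3] ((1 : Int) - 1) 0 = c1 := by
    norm_num [PySem.List.pyGetD_zero_cons]
  have e2 : PySem.List.pyGetD [c1, c2, c3] ((2 : Int) - 1) 0 = c2 := by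
    rw [show ((2 : Int) - 1) = ((1 : Nat) : Int) by norm_num, PySem.List.pyGetD_natCast]
    rfl
  have e3 : PySem.List.pyGetD [c1, c2, c3] ((3 : Int) - 1) 0 = c3 := by
    rw [show ((3 : Int) - 1) = ((2 : Nat) : Int) by norm_num, PySem.List.pyGetD_natCast]
    rfl
  simp only [e1, e2, e3]
  generalize max (max c1 c2) c3 = m
  by_cases g1 : c1 = m <;> by_cases g2 : c2 = m <;> by_cases g3 : c3 = m <;>
    simp [g1, g2, g3]

-- ===== VERDICT (by name: the statement is the Claim_ definition above) =====
set_option maxHeartbeats 1600000 in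
theorem solution_spec : Claim_equal_solution := by
  intro answers _ hpre
  unfold Spec_solution
  have hnd := dictA_nodup answers
  have hg1 := dictA_getD1 answers
  have hg2 := dictA_getD2 answers
  have hg3 := dictA_getD3 answers
  have hex := pre_cnt answers hpre
  -- the dict is nonempty, so max? returns some M
  have hkey : ∃ k : Int, k ∈ (dictA answers).keys := by
    rcases hex with h | h | h
    · exact ⟨1, (dictA_mem answers 1).2 (Or.inl ⟨rfl, h⟩)⟩
    · exact ⟨2, (dictA_mem answers 2).2 (Or.inr (Or.inl ⟨rfl, h⟩))⟩
    · exact ⟨3, (dictA_mem answers 3).2 (Or.inr (Or.inr ⟨rfl, h⟩))⟩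
  have hvals : (dictA answers).values = (dictA answers).keys.map (fun k => (dictA answers).getD k 0) :=
    PySem.Dict.values_eq_map_keys _ hnd 0
  obtain ⟨M, hM⟩ : ∃ M, PySem.List.max? (dictA answers).values (fun v => v) = some M := by
    cases h : PySem.List.max? (dictA answers).values (fun v => v) with
    | none =>
      exfalso
      rw [PySem.List.max?_eq_none_iff, hvals, List.map_eq_nil_iff] at h
      obtain ⟨k, hk⟩ := hkey
      simp [h] at hk
    | some m => exact ⟨m, rfl⟩
  have hub : ∀ k ∈ (dictA answers).keys, (dictA answers).getD k 0 ≤ M := by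
    intro k hk
    exact PySem.List.max?_isMax hM _ (by rw [hvals]; exact List.mem_map_of_mem hk)
  -- M is one of the positive counts, hence 1 ≤ M
  obtain ⟨kM, hkMmem, hkMval⟩ : ∃ k ∈ (dictA answers).keys, (dictA answers).getD k 0 = M := by
    have := PySem.List.max?_mem hM
    rw [hvals] at this
    obtain ⟨k, hk, hv⟩ := List.mem_map.1 this
    exact ⟨k, hk, hv⟩
  have hMpos : 1 ≤ M := by
    rcases (dictA_mem answers kM).1 hkMmem with ⟨rfl, h⟩ | ⟨rfl, h⟩ | ⟨rfl, h⟩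
    · rw [hg1] at hkMval; omega
    · rw [hg2] at hkMval; omega
    · rw [hg3] at hkMval; omega
  -- every count is ≤ M
  have hub1 : (cntA oneA answers : Int) ≤ M := by
    by_cases h : cntA oneA answers = 0
    · rw [h]; omega
    · rw [← hg1]; exact hub 1 ((dictA_mem answers 1).2 (Or.inl ⟨rfl, h⟩))
  have hub2 : (cntA twoA answers : Int) ≤ M := by
    by_cases h : cntA twoA answers = 0
    · rw [h]; omega
    · rw [← hg2]; exact hub 2 ((dictA_mem answers 2).2 (Or.inr (Or.inl ⟨rfl, h⟩)))
  have hub3 : (cntA threeA answers : Int) ≤ M := by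
    by_cases h : cntA threeA answers = 0
    · rw [h]; omega
    · rw [← hg3]; exact hub 3 ((dictA_mem answers 3).2 (Or.inr (Or.inr ⟨rfl, h⟩)))
  have hMbest : max (max (cntA oneA answers : Int) (cntA twoA answers)) (cntA threeA answers) = M := by
    apply le_antisymm (max_le (max_le hub1 hub2) hub3)
    rcases (dictA_mem answers kM).1 hkMmem with ⟨rfl, _⟩ | ⟨rfl, _⟩ | ⟨rfl, _⟩
    · rw [hg1] at hkMval; rw [← hkMval]
      exact le_trans (le_max_left _ _) (le_max_left _ _)
    · rw [hg2] at hkMval; rw [← hkMval]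
      exact le_trans (le_max_right _ _) (le_max_left _ _)
    · rw [hg3] at hkMval; rw [← hkMval]; exact le_max_right _ _
  -- both sides as explicit filters
  rw [solution_eq answers M hM, alt_eq answers, hMbest]
  have hpw3 : List.Pairwise (fun x y : Int × Int => x.1 < y.1)
      [((1 : Int), (cntA oneA answers : Int)), (2, (cntA twoA answers : Int)), (3, (cntA threeA answers : Int))] := by
    norm_num [List.pairwise_cons]
  have hpwR : (List.map Prod.fst (List.filter (fun ns => ns.2 == M)
      [((1 : Int), (cntA oneA answers : Int)), (2, (cntA twoA answers : Int)),
       (3, (cntA threeA answers : Int))])).Pairwise (fun a b : Int => a < b) := by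
    rw [List.pairwise_map]; exact hpw3.filter _
  have hndR : (List.map Prod.fst (List.filter (fun ns => ns.2 == M)
      [((1 : Int), (cntA oneA answers : Int)), (2, (cntA twoA answers : Int)),
       (3, (cntA threeA answers : Int))])).Nodup := hpwR.imp (fun h => ne_of_lt h)
  apply PySem.List.sorted_eq_of_perm_of_pairwise_lt _ _ _ ?hperm hpwR
  rw [List.perm_ext_iff_of_nodup hndR ((dictA_nodup answers).filter _)]
  intro a
  have hR : a ∈ List.map Prod.fst (List.filter (fun ns => ns.2 == M)
      [((1 : Int), (cntA oneA answers : Int)), (2, (cntA twoA answers : Int)), (3, (cntA threeA answers : Int))]) ↔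
      ((a = 1 ∧ (cntA oneA answers : Int) = M) ∨ (a = 2 ∧ (cntA twoA answers : Int) = M) ∨
       (a = 3 ∧ (cntA threeA answers : Int) = M)) := by
    simp [List.mem_filter]
    tauto
  rw [hR, List.mem_filter]
  constructor
  · rintro (⟨rfl, h⟩ | ⟨rfl, h⟩ | ⟨rfl, h⟩)
    · exact ⟨(dictA_mem answers 1).2 (Or.inl ⟨rfl, by omega⟩), by rw [hg1]; simpa using h⟩
    · exact ⟨(dictA_mem answers 2).2 (Or.inr (Or.inl ⟨rfl, by omega⟩)), by rw [hg2]; simpa using h⟩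
    · exact ⟨(dictA_mem answers 3).2 (Or.inr (Or.inr ⟨rfl, by omega⟩)), by rw [hg3]; simpa using h⟩
  · rintro ⟨hmem, hval⟩
    rcases (dictA_mem answers a).1 hmem with ⟨rfl, _⟩ | ⟨rfl, _⟩ | ⟨rfl, _⟩
    · exact Or.inl ⟨rfl, by rw [← hg1]; simpa using hval⟩
    · exact Or.inr (Or.inl ⟨rfl, by rw [← hg2]; simpa using hval⟩)
    · exact Or.inr (Or.inr ⟨rfl, by rw [← hg3]; simpa using hval⟩)
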